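-- pv_equiv track=rewrite | github.com/EnxZhou/ifc-operate | pythonocc-test/src/graph/graphNodeUtil.py | is_majority_subset_of_coplanar_set
-- ===== SOURCE A (Python) =====
-- def is_majority_subset_of_coplanar_set(a, coplanar_main_set):
--     subset_counts = {}  # Dictionary to store counts of lists in coplanar_main_set
--     for subset in coplanar_main_set:
--         count = sum(1 for lst in a if lst in subset)
--         subset_counts[tuple(subset)] = count
--
--     max_count_subset = max(subset_counts, key=subset_counts.get)
--     max_count = subset_counts[max_count_subset]
--     return max_count_subset, max_count
-- ===== SOURCE B (Python) =====
-- def is_majority_subset_of_coplanar_set(a, coplanar_main_set):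
--     # frequency index of a built once, so each subset is counted in O(len(subset))
--     freq = {}
--     for x in a:
--         freq[x] = freq.get(x, 0) + 1
--     best_subset, best_count = (), -1
--     for subset in coplanar_main_set:
--         count = sum(freq.get(x, 0) for x in set(subset))
--         if best_count < count:
--             best_subset, best_count = tuple(subset), count
--     return best_subset, best_count
-- ===== Notes on version B (the rewrite author's own statement) =====
-- stated objective: faster
-- what changed: B replaces A's build-a-dict-of-counts-then-max pass (which rescans the whole list a for every subset via 'lst in subset') with a frequency dictionary of a built once plus a single streaming running-max over coplanar_main_set, counting each subset as a sum of frequencies over its distinct elements.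
import Mathlib
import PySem

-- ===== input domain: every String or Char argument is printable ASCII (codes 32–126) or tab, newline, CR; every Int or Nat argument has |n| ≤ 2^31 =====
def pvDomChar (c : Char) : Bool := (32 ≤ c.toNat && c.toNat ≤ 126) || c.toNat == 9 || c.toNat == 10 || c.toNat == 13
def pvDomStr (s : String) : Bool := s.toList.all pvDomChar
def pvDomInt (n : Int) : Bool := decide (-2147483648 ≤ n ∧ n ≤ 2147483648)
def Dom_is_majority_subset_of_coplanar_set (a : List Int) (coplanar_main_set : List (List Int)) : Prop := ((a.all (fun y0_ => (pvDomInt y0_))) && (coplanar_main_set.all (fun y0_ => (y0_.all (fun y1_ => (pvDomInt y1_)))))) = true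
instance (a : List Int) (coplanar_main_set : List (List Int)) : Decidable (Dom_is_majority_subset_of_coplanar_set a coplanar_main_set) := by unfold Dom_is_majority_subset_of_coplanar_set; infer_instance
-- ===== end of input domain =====

-- B builds a frequency dict of `a` once and keeps a streaming running max over the subsets,
-- instead of A's per-subset rescans of `a` plus a dict-then-max pass.


-- ===== PORT A =====
def is_majority_subset_of_coplanar_set (a : List Int) (coplanar_main_set : List (List Int)) : List Int × Int :=
  let subset_counts : PySem.Dict (List Int) Int :=
    coplanar_main_set.foldl
      (fun d subset =>
        d.insert subset (a.foldl (fun count lst => if lst ∈ subset then count + 1 else count) 0))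
      PySem.Dict.empty
  -- max(subset_counts, key=subset_counts.get): every key queried is in the dict, so .get is ported as getD _ 0
  match PySem.List.max? subset_counts.keys (fun k => subset_counts.getD k 0) with
  | some max_count_subset => (max_count_subset, subset_counts.getD max_count_subset 0)
  | none => ([], -1)  -- unreachable under Pre_: max() of an empty dict raises ValueError

-- ===== PORT B =====
def is_majority_subset_of_coplanar_set_alt (a : List Int) (coplanar_main_set : List (List Int)) : List Int × Int :=
  let freq : PySem.Dict Int Int :=
    a.foldl (fun d x => d.insert x (d.getD x 0 + 1)) PySem.Dict.empty
  coplanar_main_set.foldl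
    (fun best subset =>
      let count := ((PySem.Set.ofList subset).map (fun x => freq.getD x 0)).sum
      if best.2 < count then (subset, count) else best)
    ([], -1)

-- ===== PRECONDITION & SPEC =====
-- Pre_ excludes exactly the inputs on which A raises: max() of the empty dict (ValueError).
def Pre_is_majority_subset_of_coplanar_set (a : List Int) (coplanar_main_set : List (List Int)) : Prop :=
  coplanar_main_set ≠ []
instance (a : List Int) (coplanar_main_set : List (List Int)) : Decidable (Pre_is_majority_subset_of_coplanar_set a coplanar_main_set) := by unfold Pre_is_majority_subset_of_coplanar_set; infer_instance
def pvWitness_is_majority_subset_of_coplanar_set : List Int × List (List Int) := ([1, 2, 2], [[3], [2, 1]])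

def Spec_is_majority_subset_of_coplanar_set (a : List Int) (coplanar_main_set : List (List Int)) (out : List Int × Int) : Prop := out = is_majority_subset_of_coplanar_set_alt a coplanar_main_set
instance (a : List Int) (coplanar_main_set : List (List Int)) (out : List Int × Int) : Decidable (Spec_is_majority_subset_of_coplanar_set a coplanar_main_set out) := by unfold Spec_is_majority_subset_of_coplanar_set; infer_instance

-- ===== CLAIM (what is proved, stated in full; the proofs are below) =====
def Claim_equal_is_majority_subset_of_coplanar_set : Prop := ∀ (a : List Int) (coplanar_main_set : List (List Int)), Dom_is_majority_subset_of_coplanar_set a coplanar_main_set → Pre_is_majority_subset_of_coplanar_set a coplanar_main_set → Spec_is_majority_subset_of_coplanar_set a coplanar_main_set (is_majority_subset_of_coplanar_set a coplanar_main_set)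

-- ===== LEMMAS AND PROOFS =====

-- A's count of one subset (the inner generator sum of A), named for the proofs
def pvCountA (a : List Int) (subset : List Int) : Int :=
  a.foldl (fun count lst => if lst ∈ subset then count + 1 else count) 0

theorem pv_countA_nonneg (a subset : List Int) : 0 ≤ pvCountA a subset := by
  unfold pvCountA
  have hc := PySem.List.foldl_count_if (fun lst => decide (lst ∈ subset)) a 0
  simp only [decide_eq_true_eq] at hc
  rw [hc]
  positivity

-- sum of an indicator over a Nodup list
theorem pv_sum_indicator (x : Int) : ∀ (S : List Int), S.Nodup →
    (S.map (fun v => if x = v then (1 : Int) else 0)).sum = if x ∈ S then 1 else 0 := by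
  intro S
  induction S with
  | nil => simp
  | cons y t ih =>
    intro h
    rcases List.nodup_cons.mp h with ⟨hy, ht⟩
    by_cases hxy : x = y
    · subst hxy
      simp [ih ht, hy]
    · rw [List.map_cons, List.sum_cons, if_neg hxy, ih ht, zero_add]
      by_cases hxt : x ∈ t
      · rw [if_pos hxt, if_pos (List.mem_cons_of_mem y hxt)]
      · have hxyt : x ∉ y :: t := by
          intro hmem
          rcases List.mem_cons.mp hmem with h1 | h2
          · exact hxy h1
          · exact hxt h2
        rw [if_neg hxt, if_neg hxyt]

-- summing multiplicities over the distinct elements is counting the members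
theorem pv_sum_counts_aux (subset : List Int) : ∀ (a : List Int),
    ((PySem.Set.ofList subset).map (fun x => (a.count x : Int))).sum
      = (a.countP (fun lst => decide (lst ∈ subset)) : Int) := by
  intro a
  induction a with
  | nil => simp
  | cons y t ih =>
    simp only [List.count_cons, List.countP_cons, beq_iff_eq, decide_eq_true_eq]
    push_cast
    have hsplit : ((PySem.Set.ofList subset).map
        (fun x => (t.count x : Int) + if y = x then (1:Int) else 0)).sum
        = ((PySem.Set.ofList subset).map (fun x => (t.count x : Int))).sum
          + ((PySem.Set.ofList subset).map (fun x => if y = x then (1:Int) else 0)).sum := by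
      rw [← List.sum_map_add]
    rw [hsplit, ih, pv_sum_indicator y _ (PySem.Set.nodup_ofList subset)]
    all_goals (by_cases hy : y ∈ subset <;> simp [PySem.Set.mem_ofList, hy])

-- B's frequency-sum count of one subset equals A's membership count of it
theorem pv_count_eq (a subset : List Int) :
    ((PySem.Set.ofList subset).map
        (fun x => (a.foldl (fun d x => d.insert x (d.getD x 0 + 1)) PySem.Dict.empty).getD x 0)).sum
      = pvCountA a subset := by
  have hfreq : ∀ x : Int,
      (a.foldl (fun d x => d.insert x (d.getD x 0 + 1)) PySem.Dict.empty).getD x 0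
        = (a.count x : Int) := by
    intro x
    rw [PySem.Dict.getD_foldl_insert_add_one, PySem.Dict.getD_empty]
    ring
  simp only [hfreq]
  unfold pvCountA
  have hc := PySem.List.foldl_count_if (fun lst => decide (lst ∈ subset)) a 0
  simp only [decide_eq_true_eq] at hc
  rw [hc, pv_sum_counts_aux subset a]
  ring

-- getD of A's fold of inserts, whose inserted value depends only on the key
theorem pv_getD_fold_insert (f : List Int → Int) :
    ∀ (l : List (List Int)) (d : PySem.Dict (List Int) Int) (k : List Int),
      (l.foldl (fun d s => d.insert s (f s)) d).getD k 0 = if k ∈ l then f k else d.getD k 0 := by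
  intro l
  induction l with
  | nil => simp
  | cons x t ih =>
    intro d k
    simp only [List.foldl_cons, ih, PySem.Dict.getD_insert, List.mem_cons]
    by_cases hkt : k ∈ t
    · simp [hkt]
    · by_cases hkx : k = x
      · simp [hkx]
      · simp [hkt, hkx]

-- max? over the dedup equals max? over the list itself (the key decides ties identically)
theorem pv_max_dedup (g : List Int → Int) (l : List (List Int)) :
    PySem.List.max? (PySem.Set.ofList l) g = PySem.List.max? l g := by
  induction l using List.reverseRecOn with
  | nil => rfl
  | append_singleton t x ih =>
    rw [PySem.Set.ofList_append_singleton]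
    by_cases hx : x ∈ t
    · have hmem : x ∈ PySem.Set.ofList t := (PySem.Set.mem_ofList t x).mpr hx
      rw [PySem.Set.add_of_mem hmem, ih]
      cases hm : PySem.List.max? t g with
      | none => exact absurd ((PySem.List.max?_eq_none_iff t g).mp hm ▸ hx) (List.not_mem_nil)
      | some m =>
        have hle : g x ≤ g m := PySem.List.max?_isMax hm x hx
        simp [PySem.List.max?, List.foldl_append] at hm ⊢
        rw [hm]
        simp [not_lt.mpr hle]
    · have hmem : x ∉ PySem.Set.ofList t := fun h => hx ((PySem.Set.mem_ofList t x).mp h)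
      rw [PySem.Set.add_of_not_mem hmem]
      simp only [PySem.List.max?, List.foldl_append, List.foldl_cons, List.foldl_nil]
      rw [show (PySem.Set.ofList t).foldl _ none = PySem.List.max? (PySem.Set.ofList t) g from rfl,
          show t.foldl _ none = PySem.List.max? t g from rfl, ih]

-- the running max of max? once it holds some element, without the Option
def pvRunMax (g : List Int → Int) (t : List (List Int)) (m : List Int) : List Int :=
  t.foldl (fun b x => if g b < g x then x else b) m

theorem pv_max_cons (g : List Int → Int) : ∀ (t : List (List Int)) (m : List Int),
    PySem.List.max? (m :: t) g = some (pvRunMax g t m) := by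
  intro t
  induction t with
  | nil => intro m; rfl
  | cons x s ih =>
    intro m
    have h1 : PySem.List.max? (m :: x :: s) g
        = PySem.List.max? ((if g m < g x then x else m) :: s) g := by
      by_cases h : g m < g x <;> simp [PySem.List.max?, h]
    rw [h1, ih]
    unfold pvRunMax
    simp only [List.foldl_cons]

theorem pv_stream_aux (g : List Int → Int) : ∀ (t : List (List Int)) (k : List Int),
    t.foldl (fun best subset => if best.2 < g subset then (subset, g subset) else best) (k, g k)
      = (pvRunMax g t k, g (pvRunMax g t k)) := by
  intro t
  induction t with
  | nil => intro k; rfl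
  | cons x s ih =>
    intro k
    unfold pvRunMax
    simp only [List.foldl_cons]
    by_cases h : g k < g x
    · simpa [h] using ih x
    · simpa [h] using ih k

-- B's streaming running max is max? followed by pairing the winner with its key
theorem pv_stream_eq_max (g : List Int → Int) (l : List (List Int)) (h0 : ∀ s ∈ l, 0 ≤ g s) :
    l.foldl (fun best subset => if best.2 < g subset then (subset, g subset) else best) ([], -1)
      = match PySem.List.max? l g with
        | some k => (k, g k)
        | none => ([], -1) := by
  cases l with
  | nil => rfl
  | cons s t =>
    rw [pv_max_cons]
    have hstep : ((-1 : Int)) < g s := lt_of_lt_of_le (by norm_num) (h0 s (by simp))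
    simp only [List.foldl_cons, hstep, if_pos]
    exact pv_stream_aux g t s

theorem pv_runmax_congr (f g : List Int → Int) : ∀ (t : List (List Int)) (m : List Int),
    f m = g m → (∀ x ∈ t, f x = g x) → pvRunMax f t m = pvRunMax g t m := by
  intro t
  induction t with
  | nil => intros; rfl
  | cons x s ih =>
    intro m hm hl
    have hx : f x = g x := hl x (by simp)
    have hs : ∀ y ∈ s, f y = g y := fun y hy => hl y (by simp [hy])
    unfold pvRunMax
    simp only [List.foldl_cons, hm, hx]
    by_cases h : g m < g x
    · simpa [h] using ih x hx hs
    · simpa [h] using ih m hm hs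

-- max? only looks at the key on the list's members
theorem pv_max_congr (f g : List Int → Int) (l : List (List Int)) (h : ∀ x ∈ l, f x = g x) :
    PySem.List.max? l f = PySem.List.max? l g := by
  cases l with
  | nil => rfl
  | cons x t =>
    rw [pv_max_cons, pv_max_cons,
        pv_runmax_congr f g t x (h x (by simp)) (fun y hy => h y (by simp [hy]))]

-- the whole pipeline, with the dict and the count function abstracted
theorem pv_main (c : List Int → Int) (hc : ∀ s, 0 ≤ c s) (cm : List (List Int))
    (d : PySem.Dict (List Int) Int)
    (hkeys : d.keys = PySem.Set.ofList cm) (hgetD : ∀ k ∈ cm, d.getD k 0 = c k) :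
    (match PySem.List.max? d.keys (fun k => d.getD k 0) with
      | some k => (k, d.getD k 0)
      | none => (([] : List Int), (-1 : Int)))
      = cm.foldl (fun best subset => if best.2 < c subset then (subset, c subset) else best)
          ([], -1) := by
  rw [pv_stream_eq_max c cm (fun s _ => hc s), hkeys]
  have hs : PySem.List.max? (PySem.Set.ofList cm) (fun k => d.getD k 0)
      = PySem.List.max? cm c := by
    rw [pv_max_congr _ c (PySem.Set.ofList cm)
        (fun x hx => hgetD x ((PySem.Set.mem_ofList cm x).mp hx))]
    exact pv_max_dedup c cm
  rw [hs]
  cases hm : PySem.List.max? cm c with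
  | none => rfl
  | some k =>
    show (k, d.getD k 0) = (k, c k)
    rw [hgetD k (PySem.List.max?_mem hm)]

-- ===== VERDICT (by name: the statement is the Claim_ definition above) =====
theorem is_majority_subset_of_coplanar_set_spec : Claim_equal_is_majority_subset_of_coplanar_set := by
  intro a cm _ _
  unfold Spec_is_majority_subset_of_coplanar_set
  unfold is_majority_subset_of_coplanar_set is_majority_subset_of_coplanar_set_alt
  have hkeys : (cm.foldl
      (fun d subset =>
        d.insert subset (a.foldl (fun count lst => if lst ∈ subset then count + 1 else count) 0))
      (PySem.Dict.empty : PySem.Dict (List Int) Int)).keys = PySem.Set.ofList cm := by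
    rw [PySem.Dict.keys_foldl_insert, PySem.Dict.keys_empty, PySem.Set.update_nil_left]
  have hgetD : ∀ k ∈ cm, (cm.foldl
      (fun d subset =>
        d.insert subset (a.foldl (fun count lst => if lst ∈ subset then count + 1 else count) 0))
      (PySem.Dict.empty : PySem.Dict (List Int) Int)).getD k 0
      = ((PySem.Set.ofList k).map
          (fun x => (a.foldl (fun d x => d.insert x (d.getD x 0 + 1))
            (PySem.Dict.empty : PySem.Dict Int Int)).getD x 0)).sum := by
    intro k hk
    have h1 := pv_getD_fold_insert
      (fun s => a.foldl (fun count lst => if lst ∈ s then count + 1 else count) 0) cm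
      PySem.Dict.empty k
    rw [if_pos hk] at h1
    exact h1.trans (pv_count_eq a k).symm
  exact pv_main
    (fun subset => ((PySem.Set.ofList subset).map
      (fun x => (a.foldl (fun d x => d.insert x (d.getD x 0 + 1))
        (PySem.Dict.empty : PySem.Dict Int Int)).getD x 0)).sum)
    (fun s => by
      have h := pv_countA_nonneg a s
      rw [← pv_count_eq a s] at h
      exact h)
    cm _ hkeys hgetD
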